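-- pv_equiv track=rewrite | github.com/liupengsay/PyIsTheBestLang | src/mathmatics/bit_operation.py | lc_2564
-- ===== SOURCE A (Python) =====
-- from collections import defaultdict, Counter
--
-- def lc_2564(s, queries):
--     # 预处理相同异或值的索引
--     dct = defaultdict(set)
--     m = len(queries)
--     for i in range(m):
--         a, b = queries[i]
--         x = bin(a ^ b)[2:]
--         dct[x].add(i)
--     ceil = max(len(x) for x in dct)
--     ans = [[-1, -1] for _ in range(m)]
--     # 遍历往前回溯查找个数
--     n = len(s)
--     for i in range(n):
--         for j in range(max(i - ceil + 1, 0), i + 1):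
--             st = s[j:i + 1]
--             if dct[st]:
--                 for k in dct[st]:
--                     ans[k] = [j, i]
--                 dct[st] = set()
--     return ans
-- ===== SOURCE B (Python) =====
-- def lc_2564(s, queries):
--     # one s.find per distinct target instead of scanning every window of s
--     ts = [bin(a ^ b)[2:] for a, b in queries]
--     loc = {}
--     for t in ts:
--         if t not in loc:
--             p = s.find(t)
--             loc[t] = [p, p + len(t) - 1] if p >= 0 else [-1, -1]
--     return [loc[t] for t in ts]
-- ===== Notes on version B (the rewrite author's own statement) =====
-- stated objective: faster
-- what changed: A indexes queries by target string and then scans every window of up to ceil characters at every position of s, emptying dict entries as matches appear; B computes bin(a^b)[2:] per query and finds the leftmost occurrence with one s.find per distinct target (memoised in a dict), eliminating the window rescan entirely.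
import Mathlib
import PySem

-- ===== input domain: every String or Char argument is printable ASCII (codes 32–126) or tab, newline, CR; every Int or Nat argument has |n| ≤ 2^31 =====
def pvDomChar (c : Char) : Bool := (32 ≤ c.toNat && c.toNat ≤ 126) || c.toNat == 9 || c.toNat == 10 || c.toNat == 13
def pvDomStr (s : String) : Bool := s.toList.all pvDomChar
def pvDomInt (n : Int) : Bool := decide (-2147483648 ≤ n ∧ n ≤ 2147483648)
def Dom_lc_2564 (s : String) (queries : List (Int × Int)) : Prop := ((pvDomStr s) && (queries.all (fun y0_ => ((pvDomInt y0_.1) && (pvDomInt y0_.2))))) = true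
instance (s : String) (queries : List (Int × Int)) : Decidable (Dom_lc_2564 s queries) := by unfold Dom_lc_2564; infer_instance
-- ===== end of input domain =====

-- B replaces A's per-position backward window rescan of s by one s.find per distinct
-- target string (leftmost occurrence directly); return value only, neither mutates its arguments.

-- ===== PORT A =====
-- bin(a ^ b)[2:]  (PySem.Int.pyBin is Python's bin; [2:] is the slice)
def pvTgt (q : Int × Int) : List Char :=
  PySem.List.slice (PySem.Int.pyBin (PySem.Int.bxor q.1 q.2)).toList (some 2) none

-- dct = defaultdict(set); for i in range(m): a, b = queries[i]; dct[bin(a^b)[2:]].add(i)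
def pvBuild (queries : List (Int × Int)) : PySem.Dict (List Char) (PySem.Set Int) :=
  (PySem.List.pyRange 0 (PySem.List.len queries) 1).foldl
    (fun d i => d.modify (pvTgt (PySem.List.pyGetD queries i (0, 0))) [] (fun st => PySem.Set.add st i))
    PySem.Dict.empty

-- ceil = max(len(x) for x in dct)  (max() of an empty generator raises: excluded by Pre_)
def pvCeil (queries : List (Int × Int)) : Int :=
  (PySem.List.max? ((pvBuild queries).keys.map (fun x => (x.length : Int))) id).getD 0

def lc_2564 (s : String) (queries : List (Int × Int)) : List (List Int) :=
  let cs := s.toList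
  let dct := pvBuild queries
  let ceil := pvCeil queries
  -- ans = [[-1, -1] for _ in range(m)]
  let ans0 : List (List Int) := (PySem.List.pyRange 0 (PySem.List.len queries) 1).map (fun _ => ([-1, -1] : List Int))
  let n : Int := PySem.List.len cs
  -- for i in range(n): for j in range(max(i - ceil + 1, 0), i + 1): st = s[j:i+1]; if dct[st]: …
  ((PySem.List.pyRange 0 n 1).foldl (fun st i =>
      (PySem.List.pyRange (max (i - ceil + 1) 0) (i + 1) 1).foldl (fun st2 j =>
        let sub := PySem.List.slice cs (some j) (some (i + 1))
        let v := st2.1.getD sub []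
        if v ≠ [] then
          (st2.1.insert sub [], v.foldl (fun a k => PySem.List.pySetD a k [j, i]) st2.2)
        else st2) st)
    (dct, ans0)).2

-- ===== PORT B =====
def lc_2564_alt (s : String) (queries : List (Int × Int)) : List (List Int) :=
  -- ts = [bin(a ^ b)[2:] for a, b in queries]
  let ts := queries.map pvTgt
  -- loc = {}; for t in ts: if t not in loc: p = s.find(t); loc[t] = [p, p+len(t)-1] if p >= 0 else [-1,-1]
  let loc : PySem.Dict (List Char) (List Int) :=
    ts.foldl (fun d t =>
      if d.contains t then d
      else
        let p := PySem.Chars.find s.toList t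
        d.insert t (if 0 ≤ p then [p, p + (t.length : Int) - 1] else [-1, -1]))
      PySem.Dict.empty
  -- return [loc[t] for t in ts]
  ts.map (fun t => loc.getD t [-1, -1])

-- ===== PRECONDITION & SPEC =====
-- Pre_ excludes only the empty query list, on which A raises ValueError (max() of an empty generator).
def Pre_lc_2564 (s : String) (queries : List (Int × Int)) : Prop := queries ≠ []
instance (s : String) (queries : List (Int × Int)) : Decidable (Pre_lc_2564 s queries) := by unfold Pre_lc_2564; infer_instance
def pvWitness_lc_2564 : String × (List (Int × Int)) := ("0110", [(2, 3), (5, 0)])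

def Spec_lc_2564 (s : String) (queries : List (Int × Int)) (out : List (List Int)) : Prop := out = lc_2564_alt s queries
instance (s : String) (queries : List (Int × Int)) (out : List (List Int)) : Decidable (Spec_lc_2564 s queries out) := by unfold Spec_lc_2564; infer_instance

-- ===== CLAIM (what is proved, stated in full; the proofs are below) =====
def Claim_equal_lc_2564 : Prop := ∀ (s : String) (queries : List (Int × Int)), Dom_lc_2564 s queries → Pre_lc_2564 s queries → Spec_lc_2564 s queries (lc_2564 s queries)

-- ===== LEMMAS AND PROOFS =====

-- proof-side abbreviations for A's inner loop body, the (i, j) traversal order, and both results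

def pvStep (cs : List Char) (st2 : PySem.Dict (List Char) (PySem.Set Int) × List (List Int)) (p : Int × Int) : PySem.Dict (List Char) (PySem.Set Int) × List (List Int) :=
  let sub := PySem.List.slice cs (some p.2) (some (p.1 + 1))
  let v := st2.1.getD sub []
  if v ≠ [] then (st2.1.insert sub [], v.foldl (fun a k => PySem.List.pySetD a k [p.2, p.1]) st2.2) else st2

def pvPairs (n ceil : Int) : List (Int × Int) :=
  (PySem.List.pyRange 0 n 1).flatMap (fun i => (PySem.List.pyRange (max (i - ceil + 1) 0) (i + 1) 1).map (fun j => (i, j)))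

def pvFirst (cs : List Char) (P : List (Int × Int)) (t : List Char) : Option (Int × Int) :=
  P.find? (fun p => PySem.List.slice cs (some p.2) (some (p.1 + 1)) == t)

def pvOut (cs : List Char) (P : List (Int × Int)) (t : List Char) : List Int :=
  match pvFirst cs P t with
  | some p => [p.2, p.1]
  | none => [-1, -1]

def pvAns (cs t : List Char) : List Int :=
  if 0 ≤ PySem.Chars.find cs t then
    [PySem.Chars.find cs t, PySem.Chars.find cs t + (t.length : Int) - 1]
  else [-1, -1]

-- (A) targets are nonempty strings
theorem pv_toDigitsCore_len (b : Nat) : ∀ (fuel n : Nat) (ds : List Char), 0 < fuel →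
    ds.length < (Nat.toDigitsCore b fuel n ds).length := by
  intro fuel
  induction fuel with
  | zero => intro n ds h; exact absurd h (by omega)
  | succ f ih =>
    intro n ds _
    rw [Nat.toDigitsCore]
    split
    · simp
    · cases f with
      | zero => rw [Nat.toDigitsCore]; simp
      | succ f' => exact Nat.lt_trans (by simp) (ih _ _ (Nat.succ_pos _))

theorem pvTgt_length_pos (q : Int × Int) : 1 ≤ (pvTgt q).length := by
  unfold pvTgt
  rw [PySem.Int.toList_pyBin, PySem.List.slice_from _ (by norm_num : (0:Int) ≤ 2)]
  unfold PySem.Int.toBinChars0b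
  split
  · simp
  · have h := pv_toDigitsCore_len 2 ((PySem.Int.bxor q.1 q.2).toNat + 1)
      (PySem.Int.bxor q.1 q.2).toNat [] (Nat.succ_pos _)
    unfold Nat.toDigits
    simp only [show ((2 : Int).toNat) = 2 from rfl, List.drop_succ_cons, List.drop_zero]
    simpa using h

-- (B) what the built dict holds
theorem pv_build_mem (queries : List (Int × Int)) (t : List Char) (k : Int) :
    k ∈ (pvBuild queries).getD t [] ↔
      ∃ (kn : Nat) (h : kn < queries.length), k = (kn : Int) ∧ pvTgt queries[kn] = t := by
  have h1 : pvBuild queries = (PySem.List.enumerate queries).foldl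
      (fun d p => d.modify (pvTgt p.2) [] (fun st => PySem.Set.add st p.1)) PySem.Dict.empty := by
    rw [pvBuild, PySem.List.enumerate_eq_map_pyRange queries (0, 0), List.foldl_map]
  have gen : ∀ (l : List (Int × (Int × Int))) (d : PySem.Dict (List Char) (PySem.Set Int)),
      k ∈ (l.foldl (fun d p => d.modify (pvTgt p.2) [] (fun st => PySem.Set.add st p.1)) d).getD t [] ↔
        k ∈ d.getD t [] ∨ ∃ p ∈ l, p.1 = k ∧ pvTgt p.2 = t := by
    intro l
    induction l with
    | nil => simp
    | cons p l ih =>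
      intro d
      rw [List.foldl_cons, ih]
      have hmod : (d.modify (pvTgt p.2) [] (fun st => PySem.Set.add st p.1)).getD t [] =
          if t = pvTgt p.2 then PySem.Set.add (d.getD (pvTgt p.2) []) p.1 else d.getD t [] :=
        PySem.Dict.getD_modify d (pvTgt p.2) t [] _
      rw [hmod]
      by_cases ht : t = pvTgt p.2
      · subst ht
        rw [if_pos rfl]
        simp only [PySem.Set.mem_add]
        constructor
        · rintro ((h | h) | ⟨p', hp', h1, h2⟩)
          · exact Or.inl h
          · exact Or.inr ⟨p, List.mem_cons_self .., h.symm, rfl⟩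
          · exact Or.inr ⟨p', List.mem_cons_of_mem _ hp', h1, h2⟩
        · rintro (h | ⟨p', hp', h1, h2⟩)
          · exact Or.inl (Or.inl h)
          · rcases List.mem_cons.mp hp' with rfl | hp''
            · exact Or.inl (Or.inr h1.symm)
            · exact Or.inr ⟨p', hp'', h1, h2⟩
      · rw [if_neg ht]
        constructor
        · rintro (h | ⟨p', hp', h1, h2⟩)
          · exact Or.inl h
          · exact Or.inr ⟨p', List.mem_cons_of_mem _ hp', h1, h2⟩
        · rintro (h | ⟨p', hp', h1, h2⟩)
          · exact Or.inl h
          · rcases List.mem_cons.mp hp' with rfl | hp''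
            · exact absurd h2.symm ht
            · exact Or.inr ⟨p', hp'', h1, h2⟩
  rw [h1, gen]
  simp only [PySem.Dict.getD_empty, List.not_mem_nil, false_or]
  constructor
  · rintro ⟨p, hp, hp1, hp2⟩
    rw [PySem.List.mem_enumerate_iff] at hp
    obtain ⟨kn, hkn, rfl⟩ := hp
    exact ⟨kn, hkn, by simpa using hp1.symm, hp2⟩
  · rintro ⟨kn, hkn, rfl, ht⟩
    refine ⟨(0 + (kn : Int), queries[kn]), ?_, by simp, ht⟩
    rw [PySem.List.mem_enumerate_iff]
    exact ⟨kn, hkn, rfl⟩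

-- (C) every target's length is bounded by ceil
theorem pv_ceil_ge (queries : List (Int × Int)) (kn : Nat) (h : kn < queries.length) :
    ((pvTgt queries[kn]).length : Int) ≤ pvCeil queries := by
  have hm : ((kn : Int)) ∈ (pvBuild queries).getD (pvTgt queries[kn]) [] :=
    (pv_build_mem queries _ _).mpr ⟨kn, h, rfl, rfl⟩
  have hne : (pvBuild queries).getD (pvTgt queries[kn]) [] ≠ [] := by
    intro h0; rw [h0] at hm; exact absurd hm (List.not_mem_nil)
  have hcontains : (pvBuild queries).contains (pvTgt queries[kn]) = true := by
    by_contra hc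
    exact hne (PySem.Dict.getD_of_not_contains _ [] (Bool.not_eq_true _ ▸ eq_false_of_ne_true hc))
  have hkeys : pvTgt queries[kn] ∈ (pvBuild queries).keys :=
    (PySem.Dict.contains_iff_mem_keys _ _).mp hcontains
  have hmm : ((pvTgt queries[kn]).length : Int) ∈
      (pvBuild queries).keys.map (fun x => (x.length : Int)) :=
    List.mem_map_of_mem hkeys
  cases hm' : PySem.List.max? ((pvBuild queries).keys.map (fun x => (x.length : Int))) id with
  | none =>
    exfalso
    rw [PySem.List.max?_eq_none_iff] at hm'
    rw [hm'] at hmm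
    exact absurd hmm (List.not_mem_nil)
  | some m =>
    have hb := PySem.List.max?_isMax hm' _ hmm
    rw [pvCeil, hm']
    simpa using hb

-- (D) when a window of A equals a target
theorem pv_slice_eq_iff (cs t : List Char) (hL : 1 ≤ t.length) (i j : Int)
    (h0 : 0 ≤ j) (hji : j ≤ i) (hin : i < (cs.length : Int)) :
    PySem.List.slice cs (some j) (some (i + 1)) = t ↔
      (i + 1 - j = (t.length : Int) ∧ t <+: cs.drop j.toNat) := by
  rw [PySem.List.slice_toNat cs h0 (by omega)]
  have hK : (i + 1).toNat - j.toNat = (i + 1 - j).toNat := by omega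
  rw [hK]
  have hdl : (cs.drop j.toNat).length = cs.length - j.toNat := List.length_drop
  constructor
  · intro hEq
    have hlt : t.length = min (i + 1 - j).toNat (cs.drop j.toNat).length := by
      rw [← hEq, List.length_take]
    have hle : (i + 1 - j).toNat ≤ (cs.drop j.toNat).length := by
      rw [hdl]; omega
    have hL' : t.length = (i + 1 - j).toNat := by omega
    refine ⟨by omega, ?_⟩
    rw [← hEq]
    exact List.take_prefix _ _
  · rintro ⟨hK', hpre⟩
    have : (i + 1 - j).toNat = t.length := by omega
    rw [this]
    exact (List.prefix_iff_eq_take.mp hpre).symm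

-- (E) first-hit computations over integer ranges
theorem pv_findSome?_pyRange_none {γ : Type} (F : Int → Option γ) (a b : Int)
    (h : ∀ i, a ≤ i → i < b → F i = none) :
    (PySem.List.pyRange a b 1).findSome? F = none := by
  have gen : ∀ (c : Nat) (a : Int), b - a ≤ c → (∀ i, a ≤ i → i < b → F i = none) →
      (PySem.List.pyRange a b 1).findSome? F = none := by
    intro c
    induction c with
    | zero => intro a hc _; rw [PySem.List.pyRange_one_eq_nil (by omega)]; rfl
    | succ c ih =>
      intro a hc h
      by_cases hab : b ≤ a
      · rw [PySem.List.pyRange_one_eq_nil hab]; rfl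
      · rw [PySem.List.pyRange_one_cons (by omega)]
        simp only [List.findSome?_cons, h a le_rfl (by omega)]
        exact ih (a + 1) (by omega) (fun i h1 h2 => h i (by omega) h2)
  exact gen (b - a).toNat a (by omega) h

theorem pv_findSome?_pyRange_first {γ : Type} (F : Int → Option γ) (a b i0 : Int) (r : γ)
    (h1 : a ≤ i0) (h2 : i0 < b) (h3 : F i0 = some r)
    (hmin : ∀ i, a ≤ i → i < i0 → F i = none) :
    (PySem.List.pyRange a b 1).findSome? F = some r := by
  have gen : ∀ (c : Nat) (a : Int), i0 - a ≤ c → a ≤ i0 →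
      (∀ i, a ≤ i → i < i0 → F i = none) →
      (PySem.List.pyRange a b 1).findSome? F = some r := by
    intro c
    induction c with
    | zero =>
      intro a hc ha hmin'
      have : a = i0 := by omega
      subst this
      rw [PySem.List.pyRange_one_cons h2]
      simp only [List.findSome?_cons, h3]
    | succ c ih =>
      intro a hc ha hmin'
      by_cases hai : a = i0
      · subst hai
        rw [PySem.List.pyRange_one_cons h2]
        simp only [List.findSome?_cons, h3]
      · rw [PySem.List.pyRange_one_cons (by omega)]
        simp only [List.findSome?_cons, hmin' a le_rfl (by omega)]
        exact ih (a + 1) (by omega) (by omega) (fun i hi1 hi2 => hmin' i (by omega) hi2)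
  exact gen (i0 - a).toNat a (by omega) h1 hmin

theorem pv_find?_pyRange_none (p : Int → Bool) (a b : Int)
    (h : ∀ i, a ≤ i → i < b → p i = false) :
    (PySem.List.pyRange a b 1).find? p = none := by
  have gen : ∀ (c : Nat) (a : Int), b - a ≤ c → (∀ i, a ≤ i → i < b → p i = false) →
      (PySem.List.pyRange a b 1).find? p = none := by
    intro c
    induction c with
    | zero => intro a hc _; rw [PySem.List.pyRange_one_eq_nil (by omega)]; rfl
    | succ c ih =>
      intro a hc h
      by_cases hab : b ≤ a
      · rw [PySem.List.pyRange_one_eq_nil hab]; rfl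
      · rw [PySem.List.pyRange_one_cons (by omega)]
        rw [List.find?_cons, h a le_rfl (by omega)]
        exact ih (a + 1) (by omega) (fun i h1 h2 => h i (by omega) h2)
  exact gen (b - a).toNat a (by omega) h

theorem pv_find?_pyRange_first (p : Int → Bool) (a b i0 : Int)
    (h1 : a ≤ i0) (h2 : i0 < b) (h3 : p i0 = true)
    (hmin : ∀ i, a ≤ i → i < i0 → p i = false) :
    (PySem.List.pyRange a b 1).find? p = some i0 := by
  have gen : ∀ (c : Nat) (a : Int), i0 - a ≤ c → a ≤ i0 →
      (∀ i, a ≤ i → i < i0 → p i = false) →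
      (PySem.List.pyRange a b 1).find? p = some i0 := by
    intro c
    induction c with
    | zero =>
      intro a hc ha hmin'
      have : a = i0 := by omega
      subst this
      rw [PySem.List.pyRange_one_cons h2, List.find?_cons, h3]
    | succ c ih =>
      intro a hc ha hmin'
      by_cases hai : a = i0
      · subst hai
        rw [PySem.List.pyRange_one_cons h2, List.find?_cons, h3]
      · rw [PySem.List.pyRange_one_cons (by omega), List.find?_cons, hmin' a le_rfl (by omega)]
        exact ih (a + 1) (by omega) (by omega) (fun i hi1 hi2 => hmin' i (by omega) hi2)
  exact gen (i0 - a).toNat a (by omega) h1 hmin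

-- (F) one row of the traversal: the single candidate window ending at i
theorem pv_row_find (cs t : List Char) (ceil i : Int) (hL : 1 ≤ t.length)
    (hLc : (t.length : Int) ≤ ceil) (h0 : 0 ≤ i) (hn : i < (cs.length : Int)) :
    (PySem.List.pyRange (max (i - ceil + 1) 0) (i + 1) 1).find?
        (fun j => PySem.List.slice cs (some j) (some (i + 1)) == t) =
      if 0 ≤ i + 1 - (t.length : Int) ∧ t <+: cs.drop (i + 1 - (t.length : Int)).toNat
      then some (i + 1 - (t.length : Int)) else none := by
  have hlo0 : (0 : Int) ≤ max (i - ceil + 1) 0 := le_max_right _ _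
  split
  · rename_i hc
    obtain ⟨hc1, hc2⟩ := hc
    apply pv_find?_pyRange_first
    · exact max_le (by omega) hc1
    · omega
    · rw [beq_iff_eq]
      rw [pv_slice_eq_iff cs t hL _ _ hc1 (by omega) hn]
      exact ⟨by omega, hc2⟩
    · intro j hj1 hj2
      rw [beq_eq_false_iff_ne]
      intro hEq
      rw [pv_slice_eq_iff cs t hL _ _ (by omega) (by omega) hn] at hEq
      omega
  · rename_i hc
    apply pv_find?_pyRange_none
    intro j hj1 hj2
    rw [beq_eq_false_iff_ne]
    intro hEq
    rw [pv_slice_eq_iff cs t hL _ _ (by omega) (by omega) hn] at hEq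
    obtain ⟨hEq1, hEq2⟩ := hEq
    apply hc
    have hj : j = i + 1 - (t.length : Int) := by omega
    rw [← hj]
    exact ⟨by omega, hEq2⟩

-- (G) the first matching pair of the whole traversal is the leftmost occurrence
theorem pv_first_pairs (cs t : List Char) (ceil : Int) (hL : 1 ≤ t.length)
    (hLc : (t.length : Int) ≤ ceil) :
    pvFirst cs (pvPairs (cs.length : Int) ceil) t =
      if PySem.Chars.find cs t = -1 then none
      else some (PySem.Chars.find cs t + (t.length : Int) - 1, PySem.Chars.find cs t) := by
  unfold pvFirst pvPairs
  rw [List.find?_flatMap]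
  have hinner : ∀ i : Int, 0 ≤ i → i < (cs.length : Int) →
      (List.find? (fun p => PySem.List.slice cs (some p.2) (some (p.1 + 1)) == t)
        ((PySem.List.pyRange (max (i - ceil + 1) 0) (i + 1) 1).map (fun j => (i, j)))) =
      if 0 ≤ i + 1 - (t.length : Int) ∧ t <+: cs.drop (i + 1 - (t.length : Int)).toNat
      then some (i, i + 1 - (t.length : Int)) else none := by
    intro i h0 hn
    rw [List.find?_map]
    rw [show ((fun p => PySem.List.slice cs (some p.2) (some (p.1 + 1)) == t) ∘ (fun j => (i, j)))
        = (fun j => PySem.List.slice cs (some j) (some (i + 1)) == t) from rfl]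
    rw [pv_row_find cs t ceil i hL hLc h0 hn]
    split
    · rfl
    · rfl
  by_cases hp : PySem.Chars.find cs t = -1
  · rw [if_pos hp]
    apply pv_findSome?_pyRange_none
    intro i h1 h2
    rw [hinner i h1 h2, if_neg]
    rintro ⟨_, hpre⟩
    have hinf : PySem.Chars.isIn t cs = true :=
      (PySem.Chars.exists_prefix_drop_iff_isIn t cs).mp ⟨_, hpre⟩
    exact absurd ((PySem.Chars.isIn_iff_infix t cs).mp hinf)
      ((PySem.Chars.find_eq_neg_one_iff cs t).mp hp)
  · rw [if_neg hp]
    have hp0 : 0 ≤ PySem.Chars.find cs t := by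
      have := PySem.Chars.neg_one_le_find cs t; omega
    obtain ⟨hpre, hmin⟩ := PySem.Chars.find_spec hp0
    have hfl : PySem.Chars.find cs t ≤ (cs.length : Int) := PySem.Chars.find_le_length cs t
    have hlen : (PySem.Chars.find cs t).toNat + t.length ≤ cs.length := by
      have h1 := hpre.length_le
      rw [List.length_drop] at h1
      omega
    set p := PySem.Chars.find cs t with hpdef
    apply pv_findSome?_pyRange_first (i0 := p + (t.length : Int) - 1)
    · omega
    · omega
    · rw [hinner _ (by omega) (by omega)]
      rw [if_pos ?side]
      case side =>
        refine ⟨by omega, ?_⟩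
        have : p + (t.length : Int) - 1 + 1 - (t.length : Int) = p := by ring
        rw [this]
        rw [show p.toNat = (PySem.Chars.find cs t).toNat from rfl] at hpre
        exact hpre
      have : p + (t.length : Int) - 1 + 1 - (t.length : Int) = p := by ring
      rw [this]
    · intro i hi1 hi2
      rw [hinner i hi1 (by omega), if_neg]
      rintro ⟨hj0, hjpre⟩
      exact hmin (i + 1 - (t.length : Int)).toNat (by omega) hjpre

-- (H) writing the same value at a set of in-range positions
theorem pv_setAll (v : List Int) (val : List Int) (a : List (List Int))
    (hv : ∀ x ∈ v, 0 ≤ x ∧ x < (a.length : Int)) :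
    (v.foldl (fun a k => PySem.List.pySetD a k val) a).length = a.length ∧
      ∀ k : Nat, (v.foldl (fun a k => PySem.List.pySetD a k val) a)[k]? =
        if (k : Int) ∈ v then some val else a[k]? := by
  induction v generalizing a with
  | nil => simp
  | cons x v ih =>
    obtain ⟨hx0, hxl⟩ := hv x (List.mem_cons_self ..)
    rw [List.foldl_cons, PySem.List.pySetD_of_nonneg a val hx0]
    have hlen' : (a.set x.toNat val).length = a.length := List.length_set
    have hv' : ∀ y ∈ v, 0 ≤ y ∧ y < ((a.set x.toNat val).length : Int) := by
      rw [hlen']; exact fun y hy => hv y (List.mem_cons_of_mem _ hy)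
    obtain ⟨ih1, ih2⟩ := ih (a.set x.toNat val) hv'
    refine ⟨by rw [ih1, hlen'], fun k => ?_⟩
    rw [ih2 k]
    by_cases hk : (k : Int) ∈ v
    · rw [if_pos hk, if_pos (List.mem_cons_of_mem _ hk)]
    · rw [if_neg hk]
      by_cases hkx : (k : Int) = x
      · rw [if_pos (by rw [List.mem_cons]; exact Or.inl hkx)]
        rw [List.getElem?_set]
        rw [if_pos (by omega)]
        rw [if_pos (by omega)]
      · rw [if_neg (by rw [List.mem_cons]; rintro (h | h); exact hkx h; exact hk h)]
        rw [List.getElem?_set, if_neg (by omega)]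

-- (I) the main loop invariant, carried over any prefix/rest split of the traversal
theorem pv_main_fold (cs : List Char) (queries : List (Int × Int))
    (rest P : List (Int × Int)) (d : PySem.Dict (List Char) (PySem.Set Int)) (ans : List (List Int))
    (hd : ∀ t, d.getD t [] = if (pvFirst cs P t).isSome then [] else (pvBuild queries).getD t [])
    (hlen : ans.length = queries.length)
    (hans : ∀ (k : Nat) (hk : k < queries.length), ans[k]? = some (pvOut cs P (pvTgt queries[k]))) :
    (rest.foldl (pvStep cs) (d, ans)).2.length = queries.length ∧
      ∀ (k : Nat) (hk : k < queries.length),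
        (rest.foldl (pvStep cs) (d, ans)).2[k]? = some (pvOut cs (P ++ rest) (pvTgt queries[k])) := by
  induction rest generalizing P d ans with
  | nil =>
    rw [List.foldl_nil, List.append_nil]
    exact ⟨hlen, hans⟩
  | cons p rest ih =>
    rw [List.foldl_cons, List.append_cons]
    have hfirst_app : ∀ t, pvFirst cs (P ++ [p]) t = (pvFirst cs P t).or (pvFirst cs [p] t) :=
      fun t => List.find?_append
    have hsingle : ∀ t, pvFirst cs [p] t =
        if PySem.List.slice cs (some p.2) (some (p.1 + 1)) = t then some p else none := by
      intro t
      by_cases hst : PySem.List.slice cs (some p.2) (some (p.1 + 1)) = t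
      · simp [pvFirst, hst]
      · simp [pvFirst, hst]
    by_cases hv : d.getD (PySem.List.slice cs (some p.2) (some (p.1 + 1))) [] = []
    · have hstep : pvStep cs (d, ans) p = (d, ans) := by
        simp only [pvStep]
        rw [if_neg (by simpa using hv)]
      rw [hstep]
      apply ih (P ++ [p]) d ans
      · intro t
        rw [hfirst_app, hsingle]
        by_cases hst : PySem.List.slice cs (some p.2) (some (p.1 + 1)) = t
        · rw [if_pos hst]
          have : ((pvFirst cs P t).or (some p)).isSome = true := by
            cases pvFirst cs P t <;> rfl
          rw [this, if_pos rfl]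
          rw [← hst]
          exact hv
        · rw [if_neg hst, Option.or_none]
          exact hd t
      · exact hlen
      · intro k hk
        rw [hans k hk]
        congr 1
        unfold pvOut
        rw [hfirst_app, hsingle]
        by_cases hst : PySem.List.slice cs (some p.2) (some (p.1 + 1)) = pvTgt queries[k]
        · cases hP : pvFirst cs P (pvTgt queries[k]) with
          | some pr => rw [if_pos hst]; rfl
          | none =>
            exfalso
            have hb : (pvBuild queries).getD (pvTgt queries[k]) [] = [] := by
              have h1 := hd (pvTgt queries[k])
              rw [hP] at h1
              simp only [Option.isSome_none, Bool.false_eq_true, if_false] at h1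
              rw [← h1, ← hst]
              exact hv
            have hmem : ((k : Int)) ∈ (pvBuild queries).getD (pvTgt queries[k]) [] :=
              (pv_build_mem queries _ _).mpr ⟨k, hk, rfl, rfl⟩
            rw [hb] at hmem
            exact absurd hmem (List.not_mem_nil)
        · rw [if_neg hst, Option.or_none]
    · have hPnone : pvFirst cs P (PySem.List.slice cs (some p.2) (some (p.1 + 1))) = none := by
        cases hP : pvFirst cs P (PySem.List.slice cs (some p.2) (some (p.1 + 1))) with
        | some pr =>
          exfalso
          have h1 := hd (PySem.List.slice cs (some p.2) (some (p.1 + 1)))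
          rw [hP] at h1
          simp only [Option.isSome_some, if_pos] at h1
          exact hv h1
        | none => rfl
      have hvB : d.getD (PySem.List.slice cs (some p.2) (some (p.1 + 1))) [] =
          (pvBuild queries).getD (PySem.List.slice cs (some p.2) (some (p.1 + 1))) [] := by
        have h1 := hd (PySem.List.slice cs (some p.2) (some (p.1 + 1)))
        rw [hPnone] at h1
        simpa using h1
      have hstep : pvStep cs (d, ans) p =
          (d.insert (PySem.List.slice cs (some p.2) (some (p.1 + 1))) [],
            (d.getD (PySem.List.slice cs (some p.2) (some (p.1 + 1))) []).foldl
              (fun a k => PySem.List.pySetD a k [p.2, p.1]) ans) := by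
        simp only [pvStep]
        rw [if_pos (by simpa using hv)]
      rw [hstep]
      have hvmem : ∀ x ∈ d.getD (PySem.List.slice cs (some p.2) (some (p.1 + 1))) [],
          0 ≤ x ∧ x < (ans.length : Int) := by
        intro x hx
        rw [hvB] at hx
        obtain ⟨kn, hkn, rfl, _⟩ := (pv_build_mem queries _ _).mp hx
        rw [hlen]
        exact ⟨by omega, by exact_mod_cast hkn⟩
      obtain ⟨hsl, hsg⟩ := pv_setAll (d.getD (PySem.List.slice cs (some p.2) (some (p.1 + 1))) [])
        [p.2, p.1] ans hvmem
      apply ih (P ++ [p])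
      · intro t
        rw [PySem.Dict.getD_insert, hfirst_app, hsingle]
        by_cases hst : PySem.List.slice cs (some p.2) (some (p.1 + 1)) = t
        · rw [if_pos hst.symm, if_pos hst]
          have : ((pvFirst cs P t).or (some p)).isSome = true := by
            cases pvFirst cs P t <;> rfl
          rw [this, if_pos rfl]
        · rw [if_neg (fun h => hst h.symm), if_neg hst, Option.or_none]
          exact hd t
      · rw [hsl, hlen]
      · intro k hk
        rw [hsg k]
        by_cases hkv : ((k : Int)) ∈ d.getD (PySem.List.slice cs (some p.2) (some (p.1 + 1))) []
        · rw [if_pos hkv]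
          have hts : pvTgt queries[k] = PySem.List.slice cs (some p.2) (some (p.1 + 1)) := by
            rw [hvB] at hkv
            obtain ⟨kn, hkn, hke, ht⟩ := (pv_build_mem queries _ _).mp hkv
            have hkk : kn = k := by exact_mod_cast hke.symm
            subst hkk
            exact ht
          unfold pvOut
          rw [hfirst_app, hsingle, hts, hPnone, if_pos rfl]
          rfl
        · rw [if_neg hkv, hans k hk]
          congr 1
          have hts : ¬ (PySem.List.slice cs (some p.2) (some (p.1 + 1)) = pvTgt queries[k]) := by
            intro h
            apply hkv
            rw [hvB, h]
            exact (pv_build_mem queries _ _).mpr ⟨k, hk, rfl, rfl⟩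
          unfold pvOut
          rw [hfirst_app, hsingle, if_neg hts, Option.or_none]

-- (J) B's cache holds the leftmost occurrence for every target it has seen
theorem pv_loc_fold (cs : List Char) (l : List (List Char)) (d : PySem.Dict (List Char) (List Int))
    (hd : ∀ t, d.contains t = true → d.getD t [-1, -1] = pvAns cs t) :
    ∀ t, (t ∈ l ∨ d.contains t = true) →
      (l.foldl (fun d t =>
        if d.contains t then d
        else d.insert t (if 0 ≤ PySem.Chars.find cs t then
          [PySem.Chars.find cs t, PySem.Chars.find cs t + (t.length : Int) - 1]
        else [-1, -1])) d).getD t [-1, -1] = pvAns cs t := by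
  induction l generalizing d with
  | nil =>
    intro t ht
    rw [List.foldl_nil]
    rcases ht with ht | ht
    · exact absurd ht (List.not_mem_nil)
    · exact hd t ht
  | cons t0 l ih =>
    intro t ht
    rw [List.foldl_cons]
    by_cases hc : d.contains t0 = true
    · rw [if_pos hc]
      apply ih d hd
      rcases ht with ht | ht
      · rcases List.mem_cons.mp ht with rfl | ht'
        · exact Or.inr hc
        · exact Or.inl ht'
      · exact Or.inr ht
    · rw [if_neg hc]
      have hval : (if 0 ≤ PySem.Chars.find cs t0 then
          [PySem.Chars.find cs t0, PySem.Chars.find cs t0 + (t0.length : Int) - 1]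
        else [-1, -1]) = pvAns cs t0 := rfl
      rw [hval]
      apply ih (d.insert t0 (pvAns cs t0))
      · intro u hu
        rw [PySem.Dict.getD_insert]
        by_cases hu0 : u = t0
        · rw [if_pos hu0, hu0]
        · rw [if_neg hu0]
          apply hd
          rw [PySem.Dict.contains_insert] at hu
          simpa [hu0] using hu
      · rcases ht with ht | ht
        · rcases List.mem_cons.mp ht with rfl | ht'
          · exact Or.inr (PySem.Dict.contains_insert_self d t (pvAns cs t))
          · exact Or.inl ht'
        · refine Or.inr ?_
          rw [PySem.Dict.contains_insert, ht]
          simp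

-- (K) A's nested loops are the fold of pvStep over the pair traversal
theorem pv_nested_eq (cs : List Char) (ceil n : Int)
    (st0 : PySem.Dict (List Char) (PySem.Set Int) × List (List Int)) :
    (PySem.List.pyRange 0 n 1).foldl (fun st i =>
      (PySem.List.pyRange (max (i - ceil + 1) 0) (i + 1) 1).foldl (fun st2 j =>
        let sub := PySem.List.slice cs (some j) (some (i + 1))
        let v := st2.1.getD sub []
        if v ≠ [] then
          (st2.1.insert sub [], v.foldl (fun a k => PySem.List.pySetD a k [j, i]) st2.2)
        else st2) st) st0 = (pvPairs n ceil).foldl (pvStep cs) st0 := by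
  rw [pvPairs, List.foldl_flatMap]
  apply PySem.List.foldl_congr_mem
  intro acc x _
  rw [List.foldl_map]
  rfl

-- ===== VERDICT (by name: the statement is the Claim_ definition above) =====
theorem lc_2564_spec : Claim_equal_lc_2564 := by
  intro s queries _ hq
  unfold Spec_lc_2564
  simp only [lc_2564, lc_2564_alt, PySem.List.len_eq]
  rw [pv_nested_eq]
  have hd0 : ∀ t, (pvBuild queries).getD t [] =
      if (pvFirst s.toList ([] : List (Int × Int)) t).isSome then []
      else (pvBuild queries).getD t [] := by
    intro t
    simp [pvFirst]
  have hlen0 : ((PySem.List.pyRange 0 (queries.length : Int) 1).map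
      (fun _ => ([-1, -1] : List Int))).length = queries.length := by
    rw [List.length_map, PySem.List.length_pyRange_one]
    omega
  have hans0 : ∀ (k : Nat) (hk : k < queries.length),
      ((PySem.List.pyRange 0 (queries.length : Int) 1).map
        (fun _ => ([-1, -1] : List Int)))[k]? =
        some (pvOut s.toList [] (pvTgt queries[k])) := by
    intro k hk
    rw [List.getElem?_map, PySem.List.getElem?_pyRange_one]
    rw [if_pos (by omega)]
    rfl
  obtain ⟨hlenA, hA⟩ := pv_main_fold s.toList queries
    (pvPairs (s.toList.length : Int) (pvCeil queries)) [] (pvBuild queries)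
    ((PySem.List.pyRange 0 (queries.length : Int) 1).map (fun _ => ([-1, -1] : List Int)))
    hd0 hlen0 hans0
  have hloc := pv_loc_fold s.toList (queries.map pvTgt) PySem.Dict.empty
    (by intro t ht; rw [PySem.Dict.contains_empty] at ht; cases ht)
  apply List.ext_getElem?
  intro k
  by_cases hk : k < queries.length
  · rw [hA k hk]
    rw [List.getElem?_map, List.getElem?_map]
    rw [List.getElem?_eq_getElem hk]
    simp only [Option.map_some]
    have hB : ((queries.map pvTgt).foldl (fun d t =>
        if d.contains t then d
        else d.insert t (if 0 ≤ PySem.Chars.find s.toList t then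
          [PySem.Chars.find s.toList t, PySem.Chars.find s.toList t + (t.length : Int) - 1]
        else [-1, -1])) PySem.Dict.empty).getD (pvTgt queries[k]) [-1, -1] =
        pvAns s.toList (pvTgt queries[k]) := by
      apply hloc
      exact Or.inl (List.mem_map_of_mem (List.getElem_mem hk))
    rw [hB]
    congr 1
    have hL := pvTgt_length_pos queries[k]
    have hLc := pv_ceil_ge queries k hk
    rw [List.nil_append]
    unfold pvOut
    rw [pv_first_pairs s.toList (pvTgt queries[k]) (pvCeil queries) hL hLc]
    by_cases hf : PySem.Chars.find s.toList (pvTgt queries[k]) = -1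
    · rw [if_pos hf]
      unfold pvAns
      rw [if_neg (by omega)]
    · rw [if_neg hf]
      have h0 : 0 ≤ PySem.Chars.find s.toList (pvTgt queries[k]) := by
        have := PySem.Chars.neg_one_le_find s.toList (pvTgt queries[k])
        omega
      unfold pvAns
      rw [if_pos h0]
  · refine Eq.trans (List.getElem?_eq_none ?_) (Eq.symm (List.getElem?_eq_none ?_))
    · rw [hlenA]; omega
    · simp only [List.length_map]; omega
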